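-- pv_equiv track=rewrite | github.com/Alexandre-A/MPEI-P1 | getData.py | Shortening_Service
-- ===== SOURCE A (Python) =====
-- def Shortening_Service(url):
--     shortening_services = [
--         'bit.ly', 'goo.gl', 'shorte.st', 'go2l.ink', 'x.co', 'ow.ly', 't.co', 'tinyurl', 'tr.im', 'is.gd',
--         'cli.gs', 'yfrog.com', 'migre.me', 'ff.im', 'tiny.cc', 'url4.eu', 'twit.ac', 'su.pr', 'twurl.nl',
--         'snipurl.com', 'short.to', 'BudURL.com', 'ping.fm', 'post.ly', 'Just.as', 'bkite.com', 'snipr.com',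
--         'fic.kr', 'loopt.us', 'doiop.com', 'short.ie', 'kl.am', 'wp.me', 'rubyurl.com', 'om.ly', 'to.ly',
--         'bit.do', 'lnkd.in', 'db.tt', 'qr.ae', 'adf.ly', 'bitly.com', 'cur.lv', 'tinyurl.com', 'ity.im',
--         'q.gs', 'po.st', 'bc.vc', 'twitthis.com', 'u.to', 'j.mp', 'buzurl.com', 'cutt.us', 'u.bb',
--         'yourls.org', 'prettylinkpro.com', 'scrnch.me', 'filoops.info', 'vzturl.com', 'qr.net', '1url.com',
--         'tweez.me', 'v.gd', 'link.zip.net'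
--     ]
--
--     malicious_shorteners = [
--         'bit.ly', 'goo.gl', 'shorte.st', 'adf.ly', 'tinyurl', 'ow.ly', 't.co', 'is.gd',
--         'tr.im', 'q.gs', 'bc.vc', 'u.to', 'j.mp', 'cutt.us', 'ity.im', 'cur.lv'
--     ]
--
--     return int(any(service in url for service in malicious_shorteners))
-- ===== SOURCE B (Python) =====
-- import re
--
-- _MALICIOUS = [
--     'bit.ly', 'goo.gl', 'shorte.st', 'adf.ly', 'tinyurl', 'ow.ly', 't.co', 'is.gd',
--     'tr.im', 'q.gs', 'bc.vc', 'u.to', 'j.mp', 'cutt.us', 'ity.im', 'cur.lv'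
-- ]
--
-- _PATTERN = re.compile('|'.join(re.escape(d) for d in _MALICIOUS))
--
--
-- def Shortening_Service(url):
--     return int(bool(_PATTERN.search(url)))
-- ===== Notes on version B (the rewrite author's own statement) =====
-- stated objective: idiomatic
-- what changed: B drops the dead shortening_services list and replaces the any()-of-substring-tests loop with one precompiled alternation regex (re.escape-escaped) scanned once over the url; the Lean port of B is the leftmost position scan that literal-alternation regex search performs.
import Mathlib
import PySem

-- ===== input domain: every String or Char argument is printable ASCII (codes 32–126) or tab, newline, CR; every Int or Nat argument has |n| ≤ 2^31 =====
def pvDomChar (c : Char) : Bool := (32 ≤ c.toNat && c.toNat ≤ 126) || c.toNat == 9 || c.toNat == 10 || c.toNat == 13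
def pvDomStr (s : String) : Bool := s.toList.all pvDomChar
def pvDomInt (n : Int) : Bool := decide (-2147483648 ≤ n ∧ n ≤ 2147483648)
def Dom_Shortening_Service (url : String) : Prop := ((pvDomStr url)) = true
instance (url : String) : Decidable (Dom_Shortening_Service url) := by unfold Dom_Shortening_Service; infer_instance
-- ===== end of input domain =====

-- B replaces A's any()-of-substring-tests loop (and drops the dead shortening_services list)
-- by one precompiled literal-alternation regex; its port is the leftmost position scan that
-- such a regex search performs. Objective: idiomatic; same return value for every string.


-- ===== PORT A =====
-- (A's shortening_services list is dead code — it is never read — so it is not ported.)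
def maliciousShorteners : List String :=
  ["bit.ly", "goo.gl", "shorte.st", "adf.ly", "tinyurl", "ow.ly", "t.co", "is.gd",
   "tr.im", "q.gs", "bc.vc", "u.to", "j.mp", "cutt.us", "ity.im", "cur.lv"]

-- int(any(service in url for service in malicious_shorteners))
def Shortening_Service (url : String) : Int :=
  if maliciousShorteners.any (fun service => PySem.Str.isIn service url) then 1 else 0

-- ===== PORT B =====
-- Source B: int(bool(re.search('|'.join(map(re.escape, _MALICIOUS)), url))).
-- re has no PySem primitive; for a regex that is an alternation of escaped LITERALS,
-- re.search succeeds iff at some position of url one of the literals starts — this scan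
-- over positions 0..len(url) is exact for that pattern.
def Shortening_Service_alt (url : String) : Int :=
  let cs := url.toList
  if (List.range (cs.length + 1)).any
      (fun j => maliciousShorteners.any (fun d => d.toList.isPrefixOf (cs.drop j)))
  then 1 else 0

-- ===== PRECONDITION & SPEC =====
def Spec_Shortening_Service (url : String) (out : Int) : Prop := out = Shortening_Service_alt url
instance (url : String) (out : Int) : Decidable (Spec_Shortening_Service url out) := by unfold Spec_Shortening_Service; infer_instance

-- ===== CLAIM (what is proved, stated in full; the proofs are below) =====
def Claim_equal_Shortening_Service : Prop := ∀ (url : String), Dom_Shortening_Service url → Spec_Shortening_Service url (Shortening_Service url)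

-- ===== LEMMAS AND PROOFS =====

theorem malicious_ne_nil : ∀ d ∈ maliciousShorteners, d.toList ≠ [] := by decide

-- For a nonempty literal, 'sub in s' (A's test) holds iff sub starts at some position j ≤ len s (B's scan).
theorem isIn_iff_exists_range (d : String) (s : String) (hd : d.toList ≠ []) :
    PySem.Str.isIn d s = true ↔
    ∃ j ∈ List.range (s.toList.length + 1), d.toList.isPrefixOf (s.toList.drop j) = true := by
  rw [PySem.Str.isIn_iff_infix]
  constructor
  · intro h
    obtain ⟨j, hj⟩ := (PySem.Chars.exists_prefix_drop_iff_isIn d.toList s.toList).mpr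
      ((PySem.Chars.isIn_iff_infix d.toList s.toList).mpr h)
    refine ⟨j, ?_, by simpa [List.isPrefixOf_iff_prefix] using hj⟩
    rw [List.mem_range]
    by_contra hlt
    have hle : s.toList.length ≤ j := by omega
    rw [List.drop_eq_nil_of_le hle] at hj
    exact hd (List.prefix_nil.mp hj)
  · rintro ⟨j, -, hj⟩
    rw [List.isPrefixOf_iff_prefix] at hj
    exact hj.isInfix.trans (List.drop_suffix j s.toList).isInfix

theorem ports_agree (url : String) :
    Shortening_Service url = Shortening_Service_alt url := by
  unfold Shortening_Service Shortening_Service_alt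
  congr 1
  simp only [List.any_eq_true, eq_iff_iff]
  constructor
  · rintro ⟨d, hd, hin⟩
    obtain ⟨j, hj, hp⟩ := (isIn_iff_exists_range d url (malicious_ne_nil d hd)).1 hin
    exact ⟨j, hj, d, hd, hp⟩
  · rintro ⟨j, hj, d, hd, hp⟩
    exact ⟨d, hd, (isIn_iff_exists_range d url (malicious_ne_nil d hd)).2 ⟨j, hj, hp⟩⟩

-- ===== VERDICT (by name: the statement is the Claim_ definition above) =====
theorem Shortening_Service_spec : Claim_equal_Shortening_Service := by
  intro url _
  exact ports_agree url
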